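-- pv_equiv track=rewrite | github.com/AIForcesProPTIT/tf_detection | src/anchor/anchor_base.py | get_feat_sizes
-- ===== SOURCE A (Python) =====
-- from typing import Text, Tuple, Union
--
-- def get_feat_sizes(image_size: Union[Text, int, Tuple[int, int]],
--                    max_level: int):
--   """Get feat widths and heights for all levels.
--   Args:
--     image_size: A integer, a tuple (H, W), or a string with HxW format.
--     max_level: maximum feature level.
--   Returns:
--     feat_sizes: a list of tuples (height, width) for each level.
--   """
--
--   feat_sizes = [{'height': image_size[0], 'width': image_size[1]}]
--   feat_size = image_size
--   for _ in range(1, max_level + 1):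
--     feat_size = ((feat_size[0] - 1) // 2 + 1, (feat_size[1] - 1) // 2 + 1)
--     feat_sizes.append({'height': feat_size[0], 'width': feat_size[1]})
--   return feat_sizes
-- ===== SOURCE B (Python) =====
-- def get_feat_sizes(image_size, max_level):
--   """Closed form: level i is ceil(size / 2**i) = ((size-1) >> i) + 1, each level independent."""
--   return [{'height': image_size[0], 'width': image_size[1]}] + [
--       {'height': ((image_size[0] - 1) >> i) + 1,
--        'width': ((image_size[1] - 1) >> i) + 1}
--       for i in range(1, max_level + 1)]
-- ===== Notes on version B (the rewrite author's own statement) =====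
-- stated objective: simpler
-- what changed: Replaces the sequential loop that carries the previous level's size with a stateless comprehension computing each level i directly by the closed form ceil(size/2^i) = ((size-1) >> i) + 1.
import Mathlib
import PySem

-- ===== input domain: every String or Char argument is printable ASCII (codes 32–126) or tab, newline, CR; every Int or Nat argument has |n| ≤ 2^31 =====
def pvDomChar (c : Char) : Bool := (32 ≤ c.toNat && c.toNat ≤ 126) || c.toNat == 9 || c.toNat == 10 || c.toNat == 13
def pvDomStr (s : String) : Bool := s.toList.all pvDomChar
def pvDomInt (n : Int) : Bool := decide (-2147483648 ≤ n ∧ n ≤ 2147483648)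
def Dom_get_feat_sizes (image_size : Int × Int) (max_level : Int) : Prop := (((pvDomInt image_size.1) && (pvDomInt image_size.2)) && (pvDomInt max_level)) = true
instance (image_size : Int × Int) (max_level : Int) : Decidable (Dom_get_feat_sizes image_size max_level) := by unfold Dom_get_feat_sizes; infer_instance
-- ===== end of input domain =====

-- B replaces A's sequential ceil-halving loop by the per-level closed form (size-1)//2**i + 1 (simpler, stateless).


-- ===== PORT A =====
def get_feat_sizes (image_size : Int × Int) (max_level : Int) : List (List (String × Int)) :=
  let feat_sizes : List (List (String × Int)) :=
    [[("height", image_size.1), ("width", image_size.2)]]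
  let r := (PySem.List.pyRange 1 (max_level + 1) 1).foldl
    (fun (st : (Int × Int) × List (List (String × Int))) _ =>
      let feat_size := (PySem.Int.floordiv (st.1.1 - 1) 2 + 1, PySem.Int.floordiv (st.1.2 - 1) 2 + 1)
      (feat_size, st.2 ++ [[("height", feat_size.1), ("width", feat_size.2)]]))
    (image_size, feat_sizes)
  r.2

-- ===== PORT B =====
def get_feat_sizes_alt (image_size : Int × Int) (max_level : Int) : List (List (String × Int)) :=
  [[("height", image_size.1), ("width", image_size.2)]] ++
  (PySem.List.pyRange 1 (max_level + 1) 1).map (fun i =>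
    let k : Nat := i.toNat
    [("height", ((image_size.1 - 1) >>> k) + 1),
     ("width", ((image_size.2 - 1) >>> k) + 1)])

-- ===== PRECONDITION & SPEC =====
def Spec_get_feat_sizes (image_size : Int × Int) (max_level : Int) (out : List (List (String × Int))) : Prop := out = get_feat_sizes_alt image_size max_level
instance (image_size : Int × Int) (max_level : Int) (out : List (List (String × Int))) : Decidable (Spec_get_feat_sizes image_size max_level out) := by unfold Spec_get_feat_sizes; infer_instance

-- ===== CLAIM (what is proved, stated in full; the proofs are below) =====
def Claim_equal_get_feat_sizes : Prop := ∀ (image_size : Int × Int) (max_level : Int), Dom_get_feat_sizes image_size max_level → Spec_get_feat_sizes image_size max_level (get_feat_sizes image_size max_level)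

-- ===== LEMMAS AND PROOFS =====

-- one level-i entry, in closed form
def pvEnt (image_size : Int × Int) (i : Nat) : List (String × Int) :=
  [("height", PySem.Int.floordiv (image_size.1 - 1) (2 ^ i) + 1),
   ("width", PySem.Int.floordiv (image_size.2 - 1) (2 ^ i) + 1)]

-- closed-form size pair at level i
def pvSz (image_size : Int × Int) (i : Nat) : Int × Int :=
  (PySem.Int.floordiv (image_size.1 - 1) (2 ^ i) + 1,
   PySem.Int.floordiv (image_size.2 - 1) (2 ^ i) + 1)

lemma pvHalve (x : Int) (k : Nat) :
    PySem.Int.floordiv (PySem.Int.floordiv x (2 ^ k) + 1 - 1) 2 + 1 =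
    PySem.Int.floordiv x (2 ^ (k + 1)) + 1 := by
  rw [add_sub_cancel_right,
    PySem.Int.floordiv_eq_ediv_of_pos (by positivity),
    PySem.Int.floordiv_eq_ediv_of_pos (by norm_num),
    PySem.Int.floordiv_eq_ediv_of_pos (by positivity),
    Int.ediv_ediv_of_nonneg (hy := by positivity)]
  ring_nf

lemma pvLoopA (image_size : Int × Int) (n : Nat) :
    (PySem.List.pyRange 1 ((n : Int) + 1) 1).foldl
      (fun (st : (Int × Int) × List (List (String × Int))) _ =>
        let feat_size := (PySem.Int.floordiv (st.1.1 - 1) 2 + 1, PySem.Int.floordiv (st.1.2 - 1) 2 + 1)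
        (feat_size, st.2 ++ [[("height", feat_size.1), ("width", feat_size.2)]]))
      (image_size, [[("height", image_size.1), ("width", image_size.2)]]) =
    (pvSz image_size n, (List.range (n + 1)).map (pvEnt image_size)) := by
  induction n with
  | zero =>
      rw [PySem.List.pyRange_one_eq_nil (by norm_num)]
      simp [pvSz, pvEnt]
  | succ k ih =>
      have hsplit : PySem.List.pyRange 1 ((↑(k + 1) : Int) + 1) 1 =
          PySem.List.pyRange 1 ((k : Int) + 1) 1 ++ [(k : Int) + 1] := by
        have := PySem.List.pyRange_one_succ_right (a := 1) (b := (k : Int) + 1) (by omega)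
        push_cast
        exact this
      rw [hsplit, List.foldl_append, ih]
      simp only [List.foldl_cons, List.foldl_nil, List.range_succ, List.map_append, List.map_cons,
        List.map_nil, pvSz, pvEnt]
      rw [Prod.ext_iff]
      constructor
      · rw [Prod.ext_iff]
        exact ⟨pvHalve (image_size.1 - 1) k, pvHalve (image_size.2 - 1) k⟩
      · simp [List.append_assoc]
        constructor <;> (rw [Int.ediv_ediv_of_nonneg (hy := by positivity)]; ring_nf)

lemma pvAltEq (image_size : Int × Int) (n : Nat) :
    get_feat_sizes_alt image_size (n : Int) = (List.range (n + 1)).map (pvEnt image_size) := by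
  unfold get_feat_sizes_alt
  rw [PySem.List.pyRange_one (a := 1) (b := (n : Int) + 1)]
  have hn : ((n : Int) + 1 - 1).toNat = n := by omega
  rw [hn, List.range_succ_eq_map, List.map_cons, List.map_map, List.map_map]
  rw [List.singleton_append]
  refine congrArg₂ List.cons ?_ (List.map_congr_left fun k _ => ?_)
  · simp [pvEnt]
  · simp only [Function.comp_apply, pvEnt, Int.shiftRight_eq_div_pow,
      PySem.Int.floordiv_eq_ediv_of_pos (b := (2:Int) ^ (k + 1)) (by positivity)]
    have hk : ((1 : Int) + (k : Int)).toNat = k + 1 := by omega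
    rw [hk]
    push_cast
    rfl

-- ===== VERDICT (by name: the statement is the Claim_ definition above) =====
theorem get_feat_sizes_spec : Claim_equal_get_feat_sizes := by
  intro image_size max_level _
  unfold Spec_get_feat_sizes
  by_cases hpre : 0 ≤ max_level
  · obtain ⟨n, rfl⟩ : ∃ n : Nat, max_level = (n : Int) := ⟨max_level.toNat, (Int.toNat_of_nonneg hpre).symm⟩
    rw [pvAltEq]
    calc get_feat_sizes image_size (n : Int)
        = ((PySem.List.pyRange 1 ((n : Int) + 1) 1).foldl
            (fun (st : (Int × Int) × List (List (String × Int))) _ =>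
              let feat_size := (PySem.Int.floordiv (st.1.1 - 1) 2 + 1, PySem.Int.floordiv (st.1.2 - 1) 2 + 1)
              (feat_size, st.2 ++ [[("height", feat_size.1), ("width", feat_size.2)]]))
            (image_size, [[("height", image_size.1), ("width", image_size.2)]])).2 := rfl
      _ = (List.range (n + 1)).map (pvEnt image_size) := by rw [pvLoopA]
  · unfold get_feat_sizes get_feat_sizes_alt
    rw [PySem.List.pyRange_one_eq_nil (by omega)]
    simp
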